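-- pv_equiv track=rewrite | github.com/volcengine/verl | atropos/environments/intern_bootcamp/internbootcamp_lib/internbootcamp/bootcamp/drecoveringbst/drecoveringbst.py | check_possible
-- ===== SOURCE A (Python) =====
-- import math
--
-- def check_possible(a):
--     # 优化后的验证算法（带记忆化）
--     n = len(a)
--     gcd_cache = [[math.gcd(a[i], a[j]) > 1 for j in range(n)] for i in range(n)]
--     parent = [[-1]*n for _ in range(n)]
--     dp = [[False]*n for _ in range(n)]
--
--     # 构建根节点可能性
--     for i in range(n):
--         dp[i][i] = True
--
--     # 区间DP
--     for l in range(2, n+1):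
--         for i in range(n - l + 1):
--             j = i + l - 1
--             for k in range(i, j+1):
--                 left_ok = (k == i) or (dp[i][k-1] and gcd_cache[k][k-1])
--                 right_ok = (k == j) or (dp[k+1][j] and gcd_cache[k][k+1])
--                 if left_ok and right_ok:
--                     dp[i][j] = True
--                     parent[i][j] = k
--                     break
--
--     return 'Yes' if dp[0][n-1] else 'No'
-- ===== SOURCE B (Python) =====
-- import math
--
-- def check_possible(a):
--     # The interval DP in A only ever links node k to its immediate neighbours
--     # k-1 and k+1, so reachability collapses to: every consecutive pair has gcd > 1.
--     return 'Yes' if all(math.gcd(x, y) > 1 for x, y in zip(a, a[1:])) else 'No'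
-- ===== Notes on version B (the rewrite author's own statement) =====
-- stated objective: faster
-- what changed: Replaced the O(n^3) interval DP (which only ever tests gcd of adjacent elements) by a single linear scan checking gcd(a[k],a[k+1])>1 for all consecutive pairs.
import Mathlib
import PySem

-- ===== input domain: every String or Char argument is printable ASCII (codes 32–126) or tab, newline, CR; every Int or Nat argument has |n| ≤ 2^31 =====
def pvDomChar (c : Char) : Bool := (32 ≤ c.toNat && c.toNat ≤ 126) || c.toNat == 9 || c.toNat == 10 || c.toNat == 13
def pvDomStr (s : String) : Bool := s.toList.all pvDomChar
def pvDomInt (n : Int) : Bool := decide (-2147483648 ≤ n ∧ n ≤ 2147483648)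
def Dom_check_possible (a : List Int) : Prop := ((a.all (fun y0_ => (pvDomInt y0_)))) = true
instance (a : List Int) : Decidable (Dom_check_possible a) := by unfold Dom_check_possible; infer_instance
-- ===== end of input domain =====

-- B replaces A's cubic interval DP (which only ever tests gcds of ADJACENT elements) by one
-- linear scan of consecutive pairs; A raises IndexError on [] (excluded by Pre_).

-- ===== PORT A =====
-- math.gcd(a[i], a[j]) > 1; the gcd_cache list-of-lists is realized as this function of the
-- two indices (same value at every index the Python code reads)
def pvGc (a : List Int) (i j : Nat) : Bool := decide (1 < Int.gcd (a.getD i 0) (a.getD j 0))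

-- dp[i][j] read / dp[i][j] = True on the list-of-lists table (all reads/writes A performs are
-- in range, so getD/set are exact)
def pvGet (dp : List (List Bool)) (i j : Nat) : Bool := (dp.getD i []).getD j false
def pvSet (dp : List (List Bool)) (i j : Nat) : List (List Bool) :=
  dp.set i ((dp.getD i []).set j true)

-- left_ok and right_ok for candidate root k of interval [i, j] (short-circuit or/and = ||/&&)
def pvCond (a : List Int) (dp : List (List Bool)) (i j k : Nat) : Bool :=
  (k == i || (pvGet dp i (k - 1) && pvGc a k (k - 1))) &&
  (k == j || (pvGet dp (k + 1) j && pvGc a k (k + 1)))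

-- dp = [[False]*n for _ in range(n)], then `for i in range(n): dp[i][i] = True`
def pvInit (n : Nat) : List (List Bool) :=
  (List.range n).foldl (fun dp i => pvSet dp i i)
    (List.replicate n (List.replicate n false))

-- `for i in range(n - l + 1)` with j = i + l - 1; the `for k in range(i, j+1)` loop with its
-- `break` is the first k passing the test (List.find?); range(i, j+1) = List.range' i (j+1-i),
-- exact here since the bounds are nonnegative; the `parent` table of A is dead for the
-- returned value and is omitted
def pvInner (a : List Int) (l n : Nat) (dp : List (List Bool)) : List (List Bool) :=
  (List.range (n - l + 1)).foldl (fun dp i =>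
    match (List.range' i (i + l - 1 + 1 - i)).find? (pvCond a dp i (i + l - 1)) with
    | some _ => pvSet dp i (i + l - 1)
    | none => dp) dp

-- `for l in range(2, n+1)` = List.range' 2 (n+1-2), exact for these nonnegative bounds
def pvDP (a : List Int) (n : Nat) : List (List Bool) :=
  (List.range' 2 (n + 1 - 2)).foldl (fun dp l => pvInner a l n dp) (pvInit n)

def check_possible (a : List Int) : String :=
  let n := a.length
  if pvGet (pvDP a n) 0 (n - 1) then "Yes" else "No"

-- ===== PORT B =====
-- all(math.gcd(x, y) > 1 for x, y in zip(a, a[1:])); a[1:] = a.drop 1 (exact, nonneg bound)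
def check_possible_alt (a : List Int) : String :=
  if (a.zip (a.drop 1)).all (fun p => decide (1 < Int.gcd p.1 p.2)) then "Yes" else "No"

-- ===== PRECONDITION & SPEC =====
-- A raises IndexError on the empty list (dp[0][-1] on an empty table); Pre_ excludes exactly that.
def Pre_check_possible (a : List Int) : Prop := a ≠ []
instance (a : List Int) : Decidable (Pre_check_possible a) := by unfold Pre_check_possible; infer_instance
def pvWitness_check_possible : List Int := ([2, 4])

def Spec_check_possible (a : List Int) (out : String) : Prop := out = check_possible_alt a
instance (a : List Int) (out : String) : Decidable (Spec_check_possible a out) := by unfold Spec_check_possible; infer_instance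

-- ===== CLAIM (what is proved, stated in full; the proofs are below) =====
def Claim_equal_check_possible : Prop := ∀ (a : List Int), Dom_check_possible a → Pre_check_possible a → Spec_check_possible a (check_possible a)

-- ===== LEMMAS AND PROOFS =====

-- "every consecutive pair of a[i..j] has gcd > 1", as a Bool
def adjBool (a : List Int) (i j : Nat) : Bool :=
  (List.range' i (j - i)).all (fun k => pvGc a k (k + 1))

lemma adjBool_iff (a : List Int) (i j : Nat) :
    adjBool a i j = true ↔ ∀ k, i ≤ k → k < j → pvGc a k (k + 1) = true := by
  simp only [adjBool, List.all_eq_true, List.mem_range'_1]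
  constructor
  · intro h k hik hkj; exact h k ⟨hik, by omega⟩
  · rintro h k ⟨h1, h2⟩; exact h k h1 (by omega)

lemma adjBool_refl (a : List Int) (i : Nat) : adjBool a i i = true := by
  simp [adjBool]

lemma pvGc_comm (a : List Int) (i j : Nat) : pvGc a i j = pvGc a j i := by
  simp [pvGc, Int.gcd_comm]

lemma adjBool_glue (a : List Int) (t k j : Nat) (hk : t ≤ k) (hkj : k ≤ j)
    (h1 : adjBool a t k = true)
    (h2 : k = j ∨ (pvGc a k (k + 1) = true ∧ adjBool a (k + 1) j = true)) :
    adjBool a t j = true := by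
  rw [adjBool_iff] at h1 ⊢
  rcases h2 with h2 | ⟨hg, h3⟩
  · intro m hm1 hm2; exact h1 m hm1 (by omega)
  · rw [adjBool_iff] at h3
    intro m hm1 hm2
    rcases lt_trichotomy m k with h | h | h
    · exact h1 m hm1 h
    · subst h; exact hg
    · exact h3 m (by omega) hm2

lemma adjBool_restrict (a : List Int) (t j i' j' : Nat) (hi : t ≤ i') (hj : j' ≤ j)
    (h : adjBool a t j = true) : adjBool a i' j' = true := by
  rw [adjBool_iff] at h ⊢
  intro k h1 h2; exact h k (by omega) (by omega)

-- an n × n table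
def ShapeT (n : Nat) (dp : List (List Bool)) : Prop :=
  dp.length = n ∧ ∀ r ∈ dp, r.length = n

lemma shape_set (n : Nat) (dp : List (List Bool)) (i j : Nat) (h : ShapeT n dp) (hi : i < n) :
    ShapeT n (pvSet dp i j) := by
  refine ⟨by simp [pvSet, h.1], ?_⟩
  intro r hr
  rcases List.mem_or_eq_of_mem_set hr with h' | h'
  · exact h.2 r h'
  · subst h'
    rw [List.length_set]
    rw [List.getD_eq_getElem?_getD, List.getElem?_eq_getElem (show i < dp.length from by rw [h.1]; exact hi)]
    exact h.2 _ (List.getElem_mem _)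

lemma pvGet_eq (dp : List (List Bool)) (x y : Nat) :
    pvGet dp x y = ((dp[x]?.getD [])[y]?).getD false := by
  simp [pvGet, List.getD_eq_getElem?_getD]

lemma pvGet_set (n : Nat) (dp : List (List Bool)) (i j : Nat) (h : ShapeT n dp)
    (hi : i < n) (hj : j < n) (x y : Nat) :
    pvGet (pvSet dp i j) x y = if x = i ∧ y = j then true else pvGet dp x y := by
  rw [pvGet_eq, pvGet_eq]
  unfold pvSet
  by_cases hx : x = i
  · subst hx
    rw [List.getElem?_set_self (show x < dp.length from by rw [h.1]; exact hi)]
    simp only [Option.getD_some]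
    by_cases hy : y = j
    · subst hy
      have hylt : y < (dp.getD x []).length := by
        rw [List.getD_eq_getElem?_getD,
          List.getElem?_eq_getElem (show x < dp.length from by rw [h.1]; exact hi)]
        rw [Option.getD_some, h.2 _ (List.getElem_mem _)]
        omega
      rw [List.getElem?_set_self hylt]
      simp
    · rw [List.getElem?_set_ne (fun hc => hy hc.symm), if_neg (fun hc => hy hc.2)]
      rw [List.getD_eq_getElem?_getD]
  · rw [List.getElem?_set_ne (fun hc => hx hc.symm), if_neg (fun hc => hx hc.1)]

lemma pvGet_blank (n x y : Nat) :
    pvGet (List.replicate n (List.replicate n false)) x y = false := by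
  rw [pvGet_eq, List.getElem?_replicate]
  by_cases hx : x < n
  · rw [if_pos hx, Option.getD_some, List.getElem?_replicate]
    by_cases hy : y < n
    · rw [if_pos hy]; rfl
    · rw [if_neg hy]; rfl
  · rw [if_neg hx]; rfl

-- the DP invariant: the table is n × n, every in-range cell of interval length ≤ L holds the
-- adjacency answer, and longer cells are untouched
def GoodB (a : List Int) (n L : Nat) (dp : List (List Bool)) : Prop :=
  ShapeT n dp ∧ ∀ i j, i ≤ j → j < n →
    (j + 1 - i ≤ L → pvGet dp i j = adjBool a i j) ∧
    (L < j + 1 - i → pvGet dp i j = (i == j))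

lemma init_inv (n : Nat) : ∀ t, t ≤ n →
    ShapeT n ((List.range t).foldl (fun dp i => pvSet dp i i)
        (List.replicate n (List.replicate n false))) ∧
    ∀ x y, pvGet ((List.range t).foldl (fun dp i => pvSet dp i i)
        (List.replicate n (List.replicate n false))) x y = decide (x = y ∧ x < t) := by
  intro t
  induction t with
  | zero =>
    intro _
    simp only [List.range_zero, List.foldl_nil]
    refine ⟨⟨by simp, fun r hr => by rw [List.eq_of_mem_replicate hr]; simp⟩, ?_⟩
    intro x y
    rw [pvGet_blank]
    simp
  | succ t ih =>
    intro ht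
    obtain ⟨ihS, ihInv⟩ := ih (by omega)
    rw [List.range_succ, List.foldl_append]
    simp only [List.foldl_cons, List.foldl_nil]
    refine ⟨shape_set n _ t t ihS (by omega), ?_⟩
    intro x y
    rw [pvGet_set n _ t t ihS (by omega) (by omega), ihInv]
    by_cases h : x = t ∧ y = t
    · rcases h with ⟨hx, hy⟩
      subst hx; subst hy
      simp
    · rw [if_neg h]
      have hiff : (x = y ∧ x < t) ↔ (x = y ∧ x < t + 1) := by
        constructor
        · rintro ⟨h1, h2⟩; exact ⟨h1, by omega⟩
        · rintro ⟨h1, h2⟩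
          refine ⟨h1, ?_⟩
          rcases Nat.lt_succ_iff_lt_or_eq.mp h2 with h3 | h3
          · exact h3
          · exact absurd ⟨h3, by omega⟩ h
      simp [hiff]

lemma init_good (a : List Int) (n : Nat) : GoodB a n 1 (pvInit n) := by
  obtain ⟨hS, hInv⟩ := init_inv n n (le_refl n)
  refine ⟨by unfold pvInit; exact hS, ?_⟩
  intro i j hij hjn
  unfold pvInit
  rw [hInv]
  constructor
  · intro hL
    have hije : i = j := by omega
    subst hije
    have hin : i < n := by omega
    simp [adjBool_refl, hin]
  · intro hL
    have : ¬ i = j := by omega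
    simp [this]

lemma inner_inv (a : List Int) (l n : Nat) (hl : 2 ≤ l) (hln : l ≤ n)
    (dp : List (List Bool)) (h : GoodB a n (l - 1) dp) :
    ∀ t, t ≤ n - l + 1 →
      ShapeT n ((List.range t).foldl (fun dp i =>
          match (List.range' i (i + l - 1 + 1 - i)).find? (pvCond a dp i (i + l - 1)) with
          | some _ => pvSet dp i (i + l - 1)
          | none => dp) dp) ∧
      ∀ x y, pvGet ((List.range t).foldl (fun dp i =>
          match (List.range' i (i + l - 1 + 1 - i)).find? (pvCond a dp i (i + l - 1)) with
          | some _ => pvSet dp i (i + l - 1)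
          | none => dp) dp) x y
        = if x < t ∧ y = x + l - 1 then adjBool a x y else pvGet dp x y := by
  intro t
  induction t with
  | zero => intro _; exact ⟨h.1, fun x y => by simp⟩
  | succ t ih =>
    intro ht
    rw [List.range_succ, List.foldl_append]
    simp only [List.foldl_cons, List.foldl_nil]
    set dp' := (List.range t).foldl (fun dp i =>
          match (List.range' i (i + l - 1 + 1 - i)).find? (pvCond a dp i (i + l - 1)) with
          | some _ => pvSet dp i (i + l - 1)
          | none => dp) dp with hdp'
    obtain ⟨ihS, ihInv⟩ := ih (by omega)
    have hrc : t + l - 1 + 1 - t = l := by omega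
    rw [hrc]
    set j := t + l - 1 with hj
    have hjn : j < n := by omega
    have htj : t < j := by omega
    -- sub-cells queried by pvCond are untouched at this level and already correct (GoodB)
    have hsub_left : ∀ k, t < k → k ≤ j → pvGet dp' t (k - 1) = adjBool a t (k - 1) := by
      intro k hk1 hk2
      rw [ihInv t (k - 1), if_neg (by omega)]
      exact (h.2 t (k - 1) (by omega) (by omega)).1 (by omega)
    have hsub_right : ∀ k, t ≤ k → k < j → pvGet dp' (k + 1) j = adjBool a (k + 1) j := by
      intro k hk1 hk2
      rw [ihInv (k + 1) j, if_neg (by omega)]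
      exact (h.2 (k + 1) j (by omega) hjn).1 (by omega)
    -- if some k in [t, j] passes the test then the whole interval is adjacency-linked
    have hfwd : ∀ k, t ≤ k → k < t + l → pvCond a dp' t j k = true → adjBool a t j = true := by
      intro k hk1 hk2 hc
      simp only [pvCond, Bool.and_eq_true, Bool.or_eq_true, beq_iff_eq] at hc
      obtain ⟨hL, hR⟩ := hc
      have hkj : k ≤ j := by omega
      have hAtk : adjBool a t k = true := by
        by_cases hkt : k = t
        · subst hkt; exact adjBool_refl a k
        · rcases hL with hL | ⟨hd, hg⟩
          · exact absurd hL hkt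
          · have hkt' : t < k := by omega
            rw [hsub_left k hkt' hkj] at hd
            have hg' : pvGc a (k - 1) (k - 1 + 1) = true := by
              rw [pvGc_comm, show k - 1 + 1 = k from by omega]
              exact hg
            exact adjBool_glue a t (k - 1) k (by omega) (by omega) hd
              (Or.inr ⟨hg', by rw [show k - 1 + 1 = k from by omega]; exact adjBool_refl a k⟩)
      by_cases hkj' : k = j
      · subst hkj'; exact hAtk
      · rcases hR with hR | ⟨hd, hg⟩
        · exact absurd hR hkj'
        · have hkj'' : k < j := by omega
          rw [hsub_right k hk1 hkj''] at hd
          exact adjBool_glue a t k j hk1 hkj hAtk (Or.inr ⟨hg, hd⟩)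
    -- conversely the leftmost root k = t always passes when the interval is adjacency-linked
    have hbwd : adjBool a t j = true → pvCond a dp' t j t = true := by
      intro hadj
      have hd : pvGet dp' (t + 1) j = true := by
        rw [hsub_right t (le_refl t) htj]
        exact adjBool_restrict a t j (t + 1) j (by omega) (le_refl j) hadj
      have hg : pvGc a t (t + 1) = true := (adjBool_iff a t j).mp hadj t (le_refl t) htj
      simp [pvCond, hd, hg]
    rcases hf : (List.range' t l).find? (pvCond a dp' t j) with _ | k
    · -- no root found: dp unchanged, and the interval is NOT adjacency-linked
      refine ⟨ihS, ?_⟩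
      intro x y
      show pvGet dp' x y = if x < t + 1 ∧ y = x + l - 1 then adjBool a x y else pvGet dp x y
      have hnA : adjBool a t j = false := by
        by_contra hxv
        have hadj : adjBool a t j = true := by
          cases hv : adjBool a t j
          · exact absurd hv hxv
          · rfl
        have hmem : t ∈ List.range' t l := by
          rw [List.mem_range'_1]; omega
        exact absurd (hbwd hadj) (by simpa using List.find?_eq_none.mp hf t hmem)
      rw [ihInv x y]
      by_cases h1 : x < t ∧ y = x + l - 1
      · rw [if_pos h1, if_pos (by omega)]
      · rw [if_neg h1]
        by_cases h2 : x < t + 1 ∧ y = x + l - 1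
        · -- the freshly visited cell (t, j): dp holds (t == j) = false = adjBool a t j
          have hxt : x = t ∧ y = j := by omega
          rw [if_pos h2, hxt.1, hxt.2, hnA]
          have := (h.2 t j (by omega) hjn).2 (by omega)
          rw [this]
          simp [show ¬ t = j from by omega]
        · rw [if_neg h2]
    · -- root found: cell (t, j) set to True, and the interval IS adjacency-linked
      refine ⟨shape_set n dp' t j ihS (by omega), ?_⟩
      intro x y
      show pvGet (pvSet dp' t j) x y
        = if x < t + 1 ∧ y = x + l - 1 then adjBool a x y else pvGet dp x y
      have hkmem := List.mem_of_find?_eq_some hf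
      have hkp := List.find?_some hf
      rw [List.mem_range'_1] at hkmem
      have hadj : adjBool a t j = true := hfwd k hkmem.1 hkmem.2 hkp
      rw [pvGet_set n dp' t j ihS (by omega) hjn, ihInv x y]
      by_cases h1 : x = t ∧ y = j
      · rw [if_pos h1, if_pos (by omega), h1.1, h1.2, hadj]
      · rw [if_neg h1]
        by_cases h2 : x < t ∧ y = x + l - 1
        · rw [if_pos h2, if_pos (by omega)]
        · rw [if_neg h2, if_neg (by omega)]

lemma inner_good (a : List Int) (l n : Nat) (hl : 2 ≤ l) (hln : l ≤ n)
    (dp : List (List Bool)) (h : GoodB a n (l - 1) dp) :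
    GoodB a n l (pvInner a l n dp) := by
  obtain ⟨hS, hInv⟩ := inner_inv a l n hl hln dp h (n - l + 1) (le_refl _)
  refine ⟨by unfold pvInner; exact hS, ?_⟩
  intro i j hij hjn
  unfold pvInner
  rw [hInv i j]
  constructor
  · intro hL
    by_cases hcell : i < n - l + 1 ∧ j = i + l - 1
    · rw [if_pos hcell]
    · rw [if_neg hcell]
      exact (h.2 i j hij hjn).1 (by omega)
  · intro hL
    rw [if_neg (by omega)]
    exact (h.2 i j hij hjn).2 (by omega)

lemma outer_good (a : List Int) (n : Nat) (hn : 1 ≤ n) :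
    ∀ m, m ≤ n - 1 →
      GoodB a n (m + 1) ((List.range' 2 m).foldl (fun dp l => pvInner a l n dp) (pvInit n)) := by
  intro m
  induction m with
  | zero => intro _; simpa using init_good a n
  | succ m ih =>
    intro hm
    rw [List.range'_concat, List.foldl_append]
    simp only [List.foldl_cons, List.foldl_nil]
    have hprev := ih (by omega)
    have hres := inner_good a (2 + m) n (by omega) (by omega) _
      (by simpa [show 2 + m - 1 = m + 1 from by omega] using hprev)
    simpa [show 2 + m = m + 1 + 1 from by omega] using hres

-- B's scan over zipped consecutive pairs, characterized index-wise
lemma zip_adj (a : List Int) :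
    (a.zip (a.drop 1)).all (fun p => decide (1 < Int.gcd p.1 p.2)) = true
      ↔ ∀ k, k + 1 < a.length → pvGc a k (k + 1) = true := by
  induction a with
  | nil => simp
  | cons x t ih =>
    cases t with
    | nil => simp
    | cons y t' =>
      simp only [List.drop_succ_cons, List.drop_zero] at *
      rw [List.zip_cons_cons, List.all_cons, Bool.and_eq_true, ih]
      constructor
      · rintro ⟨h0, h⟩ k hk
        cases k with
        | zero => simpa [pvGc] using h0
        | succ k =>
          have hk' : k + 1 < (y :: t').length := by simpa using Nat.lt_of_succ_lt_succ hk
          simpa [pvGc] using h k hk'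
      · intro h
        refine ⟨by simpa [pvGc] using h 0 (by simp), fun k hk => ?_⟩
        have hk' : k + 1 + 1 < (x :: y :: t').length := by simpa using Nat.succ_lt_succ hk
        simpa [pvGc] using h (k + 1) hk'

-- ===== VERDICT (by name: the statement is the Claim_ definition above) =====
theorem check_possible_spec : Claim_equal_check_possible := by
  intro a _ hpre
  unfold Spec_check_possible check_possible check_possible_alt
  have hn : 1 ≤ a.length := List.length_pos_of_ne_nil hpre
  have hg := outer_good a a.length hn (a.length - 1) (le_refl _)
  have hq := (hg.2 0 (a.length - 1) (by omega) (by omega)).1 (by omega)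
  have hdef : pvGet (pvDP a a.length) 0 (a.length - 1) = adjBool a 0 (a.length - 1) := by
    unfold pvDP
    rw [show a.length + 1 - 2 = a.length - 1 from by omega]
    exact hq
  have hcond : adjBool a 0 (a.length - 1)
      = (a.zip (a.drop 1)).all (fun p => decide (1 < Int.gcd p.1 p.2)) := by
    rw [Bool.eq_iff_iff, adjBool_iff, zip_adj]
    constructor
    · intro h k hk; exact h k (by omega) (by omega)
    · intro h k _ hk; exact h k (by omega)
  simp only [hdef, hcond]
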